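-- pv_equiv track=rewrite | github.com/YoussefKhafaga/Problem-solving | LeetCode/1958. Check if Move is Legal.py | checkreverseDiagonalUp
-- ===== SOURCE A (Python) =====
-- def checkreverseDiagonalUp(board, row, column, color):
--     if row <= 1 or column <= 1:
--         return False
--     count = 1
--     board[row][column] = color
--     row -= 1
--     column -= 1
--     while row >= 0 and column >= 0:
--         if board[row][column] == ".":
--             return False
--         elif board[row][column] == color and count < 2:
--             return False
--         elif board[row][column] != color:
--             count += 1
--         elif board[row][column] == color and count >= 2:
--             return True
--         row -= 1
--         column -= 1
--     return False
-- ===== SOURCE B (Python) =====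
-- def checkreverseDiagonalUp(board, row, column, color):
--     # Same guard and in-place mutation as the original, then: materialize the
--     # whole up-left diagonal line and decide legality by two index lookups
--     # instead of a per-cell short-circuiting branch chain.
--     if row <= 1 or column <= 1:
--         return False
--     board[row][column] = color
--     line = []
--     r, c = row - 1, column - 1
--     while r >= 0 and c >= 0:
--         line.append(board[r][c])
--         r -= 1
--         c -= 1
--     idx_color = line.index(color) if color in line else -1
--     idx_dot = line.index(".") if "." in line else -1
--     return idx_color >= 1 and (idx_dot == -1 or idx_dot > idx_color)
-- ===== Notes on version B (the rewrite author's own statement) =====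
-- stated objective: alternative
-- what changed: The per-cell short-circuiting branch chain with a running count is replaced by materializing the whole up-left diagonal into a list and deciding legality from two index lookups (first occurrence of color and of '.').
-- outside the precondition, e.g. on checkreverseDiagonalUp([[], ['a', '.'], ['a', 'b', 'c']], 2, 2, 'w'): A returns False, B raises IndexError
import Mathlib
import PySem

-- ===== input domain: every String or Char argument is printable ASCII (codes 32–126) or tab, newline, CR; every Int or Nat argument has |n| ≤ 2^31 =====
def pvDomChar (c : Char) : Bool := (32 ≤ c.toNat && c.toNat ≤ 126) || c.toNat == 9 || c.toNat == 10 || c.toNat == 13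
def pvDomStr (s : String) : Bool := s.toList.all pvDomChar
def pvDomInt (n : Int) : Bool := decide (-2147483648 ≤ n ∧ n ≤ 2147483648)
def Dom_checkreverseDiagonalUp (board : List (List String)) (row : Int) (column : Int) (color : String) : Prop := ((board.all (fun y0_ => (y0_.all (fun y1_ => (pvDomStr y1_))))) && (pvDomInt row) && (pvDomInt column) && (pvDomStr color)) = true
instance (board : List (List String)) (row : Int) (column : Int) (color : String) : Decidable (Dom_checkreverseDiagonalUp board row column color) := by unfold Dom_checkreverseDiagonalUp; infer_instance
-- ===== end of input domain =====

-- B replaces A's short-circuiting per-cell branch chain by collect-the-diagonal-then-two-index-lookups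
-- (an alternative decomposition, same cost). Both Pythons mutate board[row][column] in place identically;
-- the equivalence proved here is about the RETURN value only (the mutated cell is never read back).

-- ===== PORT A =====
-- board[r][c] as one lookup; none is exactly where Python raises IndexError (excluded by Pre_).
def pvCell (board : List (List String)) (r c : Int) : Option String :=
  (PySem.List.pyGet? board r).bind (fun rw => PySem.List.pyGet? rw c)

-- A's while loop over (row, column), carrying `count`; on a missing cell (Python A raises,
-- excluded by Pre_) the port returns false.
def pvLoopA (board : List (List String)) (color : String) (count : Int) (r c : Int) : Bool :=
  if 0 ≤ r ∧ 0 ≤ c then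
    match pvCell board r c with
    | none => false
    | some cell =>
      if cell = "." then false
      else if cell = color ∧ count < 2 then false
      else if cell ≠ color then pvLoopA board color (count + 1) (r - 1) (c - 1)
      else if cell = color ∧ 2 ≤ count then true
      else pvLoopA board color count (r - 1) (c - 1)
  else false
termination_by (r + 1).toNat
decreasing_by all_goals omega

def checkreverseDiagonalUp (board : List (List String)) (row : Int) (column : Int) (color : String) : Bool :=
  if row ≤ 1 ∨ column ≤ 1 then false
  else pvLoopA board color 1 (row - 1) (column - 1)

-- ===== PORT B =====
-- Source B's line-building while loop; on a missing cell (Python B raises, excluded by Pre_)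
-- the port stops the line.
def pvBuildLine (board : List (List String)) (r c : Int) : List String :=
  if 0 ≤ r ∧ 0 ≤ c then
    match pvCell board r c with
    | none => []
    | some cell => cell :: pvBuildLine board (r - 1) (c - 1)
  else []
termination_by (r + 1).toNat
decreasing_by omega

-- `line.index(v) if v in line else -1` ported as a match on the Option-valued PySem.List.index?
def checkreverseDiagonalUp_alt (board : List (List String)) (row : Int) (column : Int) (color : String) : Bool :=
  if row ≤ 1 ∨ column ≤ 1 then false
  else
    let line := pvBuildLine board (row - 1) (column - 1)
    let idxColor : Int := match PySem.List.index? line color with | some k => (k : Int) | none => -1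
    let idxDot : Int := match PySem.List.index? line "." with | some k => (k : Int) | none => -1
    decide (1 ≤ idxColor ∧ (idxDot = -1 ∨ idxDot > idxColor))

-- ===== PRECONDITION & SPEC =====
-- Pre_ admits the trivial-guard inputs and otherwise requires every diagonal cell from (row,column)
-- up-left to the edge to exist. This excludes the inputs where Python raises IndexError
-- (board[row][column] = color, or a missing diagonal cell), and is slightly narrower than A's exact
-- no-raise set: on a ragged board A can return False early before reaching a missing diagonal cell,
-- while B, which materializes the whole diagonal first, raises IndexError there (see the cite).
def Pre_checkreverseDiagonalUp (board : List (List String)) (row : Int) (column : Int) (color : String) : Prop :=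
  row ≤ 1 ∨ column ≤ 1 ∨
    (row < (board.length : Int) ∧
      ∀ k ∈ List.range (min row.toNat column.toNat + 1),
        column.toNat - k < (board.getD (row.toNat - k) []).length)
instance (board : List (List String)) (row : Int) (column : Int) (color : String) : Decidable (Pre_checkreverseDiagonalUp board row column color) := by unfold Pre_checkreverseDiagonalUp; infer_instance

def pvWitness_checkreverseDiagonalUp : List (List String) × Int × Int × String :=
  ([["b", "w", "."], ["w", "b", "b"], [".", "w", "w"]], 2, 2, "w")

def Spec_checkreverseDiagonalUp (board : List (List String)) (row : Int) (column : Int) (color : String) (out : Bool) : Prop := out = checkreverseDiagonalUp_alt board row column color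
instance (board : List (List String)) (row : Int) (column : Int) (color : String) (out : Bool) : Decidable (Spec_checkreverseDiagonalUp board row column color out) := by unfold Spec_checkreverseDiagonalUp; infer_instance

-- ===== CLAIM (what is proved, stated in full; the proofs are below) =====
def Claim_equal_checkreverseDiagonalUp : Prop := ∀ (board : List (List String)) (row : Int) (column : Int) (color : String), Dom_checkreverseDiagonalUp board row column color → Pre_checkreverseDiagonalUp board row column color → Spec_checkreverseDiagonalUp board row column color (checkreverseDiagonalUp board row column color)

-- ===== LEMMAS AND PROOFS =====

-- A's loop, rephrased as a scan over the materialized line (proof-side only).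
def pvScanA (color : String) (count : Int) : List String → Bool
  | [] => false
  | cell :: rest =>
    if cell = "." then false
    else if cell = color ∧ count < 2 then false
    else if cell ≠ color then pvScanA color (count + 1) rest
    else if cell = color ∧ 2 ≤ count then true
    else pvScanA color count rest

-- The tail phase of the scan (count ≥ 2): first color wins, first dot loses.
def pvScanTail (color : String) : List String → Bool
  | [] => false
  | cell :: rest =>
    if cell = "." then false
    else if cell = color then true
    else pvScanTail color rest

-- B's index expressions, as a function of the line (proof-side only; definitionally
-- the body of checkreverseDiagonalUp_alt after the guard).
def pvIdxCond (color : String) (l : List String) (t : Int) : Bool :=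
  decide (t ≤ (match PySem.List.index? l color with | some k => (k : Int) | none => -1) ∧
    ((match PySem.List.index? l "." with | some k => (k : Int) | none => -1) = -1 ∨
     (match PySem.List.index? l "." with | some k => (k : Int) | none => -1) >
     (match PySem.List.index? l color with | some k => (k : Int) | none => -1)))

theorem pvLoopA_eq_scanA (n : Nat) (board : List (List String)) (color : String) :
    ∀ (count : Int) (r c : Int), (r + 1).toNat ≤ n →
      pvLoopA board color count r c = pvScanA color count (pvBuildLine board r c) := by
  induction n with
  | zero =>
    intro count r c hn
    rw [pvLoopA, pvBuildLine, if_neg (by omega), if_neg (by omega)]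
    simp [pvScanA]
  | succ n ih =>
    intro count r c hn
    rw [pvLoopA, pvBuildLine]
    by_cases hg : 0 ≤ r ∧ 0 ≤ c
    · rw [if_pos hg, if_pos hg]
      cases hcell : pvCell board r c with
      | none => simp [pvScanA]
      | some cell =>
        simp only [pvScanA]
        by_cases h1 : cell = "."
        · rw [if_pos h1, if_pos h1]
        · rw [if_neg h1, if_neg h1]
          by_cases h2 : cell = color ∧ count < 2
          · rw [if_pos h2, if_pos h2]
          · rw [if_neg h2, if_neg h2]
            by_cases h3 : cell ≠ color
            · rw [if_pos h3, if_pos h3]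
              exact ih (count + 1) (r - 1) (c - 1) (by omega)
            · rw [if_neg h3, if_neg h3]
              by_cases h4 : cell = color ∧ 2 ≤ count
              · rw [if_pos h4, if_pos h4]
              · rw [if_neg h4, if_neg h4]
                exact ih count (r - 1) (c - 1) (by omega)
    · rw [if_neg hg, if_neg hg]
      simp [pvScanA]

-- In the tail phase the exact value of count no longer matters.
theorem pvScanA_ge_two_eq_tail (color : String) :
    ∀ (l : List String) (count : Int), 2 ≤ count →
      pvScanA color count l = pvScanTail color l := by
  intro l
  induction l with
  | nil => intro count _; rfl
  | cons cell rest ih =>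
    intro count hc
    simp only [pvScanA, pvScanTail]
    by_cases h1 : cell = "."
    · rw [if_pos h1, if_pos h1]
    · rw [if_neg h1, if_neg h1]
      rw [if_neg (by omega : ¬ (cell = color ∧ count < 2))]
      by_cases h3 : cell = color
      · rw [if_neg (by simp [h3]), if_pos ⟨h3, hc⟩, if_pos h3]
      · rw [if_pos h3, if_neg h3]
        exact ih (count + 1) (by omega)

-- B's index condition with threshold 0 characterizes the tail scan.
theorem pvScanTail_eq_idx (color : String) :
    ∀ (l : List String), pvScanTail color l = pvIdxCond color l 0 := by
  intro l
  induction l with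
  | nil => simp [pvScanTail, pvIdxCond, PySem.List.index?]
  | cons cell rest ih =>
    simp only [pvScanTail, pvIdxCond]
    by_cases h1 : cell = "."
    · subst h1
      rw [if_pos rfl, PySem.List.index?_cons_self]
      by_cases h2 : "." = color
      · rw [← h2, PySem.List.index?_cons_self]
        simp
      · rw [PySem.List.index?_cons_of_ne rest h2]
        cases PySem.List.index? rest color with
        | none => simp <;> norm_cast <;> omega
        | some k => simp <;> norm_cast <;> omega
    · rw [if_neg h1, PySem.List.index?_cons_of_ne rest h1]
      by_cases h3 : cell = color
      · rw [if_pos h3, h3, PySem.List.index?_cons_self]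
        cases PySem.List.index? rest "." with
        | none => simp <;> norm_cast <;> omega
        | some k => simp <;> norm_cast <;> omega
      · rw [if_neg h3, PySem.List.index?_cons_of_ne rest h3, ih]
        simp only [pvIdxCond]
        cases hC : PySem.List.index? rest color with
        | none => simp <;> norm_cast <;> omega
        | some k =>
          cases hD : PySem.List.index? rest "." with
          | none => simp <;> norm_cast <;> omega
          | some m => simp <;> norm_cast <;> omega

-- The whole scan (count = 1) equals B's index condition with threshold 1 on the full line.
theorem pvScanA_one_eq_idx (color : String) (l : List String) :
    pvScanA color 1 l = pvIdxCond color l 1 := by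
  cases l with
  | nil => simp [pvScanA, pvIdxCond, PySem.List.index?]
  | cons cell rest =>
    simp only [pvScanA, pvIdxCond]
    by_cases h1 : cell = "."
    · subst h1
      rw [if_pos rfl, PySem.List.index?_cons_self]
      by_cases h2 : "." = color
      · rw [← h2, PySem.List.index?_cons_self]
        simp
      · rw [PySem.List.index?_cons_of_ne rest h2]
        cases PySem.List.index? rest color with
        | none => simp <;> norm_cast <;> omega
        | some k => simp <;> norm_cast <;> omega
    · rw [if_neg h1, PySem.List.index?_cons_of_ne rest h1]
      by_cases h3 : cell = color
      · rw [if_pos ⟨h3, by norm_num⟩, h3, PySem.List.index?_cons_self]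
        cases PySem.List.index? rest "." with
        | none => simp <;> norm_cast <;> omega
        | some k => simp <;> norm_cast <;> omega
      · rw [if_neg (by tauto), if_pos h3, PySem.List.index?_cons_of_ne rest h3,
            pvScanA_ge_two_eq_tail color rest (1 + 1) (by norm_num), pvScanTail_eq_idx]
        simp only [pvIdxCond]
        cases hC : PySem.List.index? rest color with
        | none => simp <;> norm_cast <;> omega
        | some k =>
          cases hD : PySem.List.index? rest "." with
          | none => simp <;> norm_cast <;> omega
          | some m => simp <;> norm_cast <;> (intro h; exact h.elim)

-- ===== VERDICT (by name: the statement is the Claim_ definition above) =====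
theorem checkreverseDiagonalUp_spec : Claim_equal_checkreverseDiagonalUp := by
  intro board row column color _ _
  unfold Spec_checkreverseDiagonalUp checkreverseDiagonalUp checkreverseDiagonalUp_alt
  by_cases hg : row ≤ 1 ∨ column ≤ 1
  · rw [if_pos hg, if_pos hg]
  · rw [if_neg hg, if_neg hg]
    exact (pvLoopA_eq_scanA ((row - 1) + 1).toNat board color 1 (row - 1) (column - 1)
      (le_refl _)).trans (pvScanA_one_eq_idx color (pvBuildLine board (row - 1) (column - 1)))
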